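-- pv_equiv track=rewrite | github.com/johnhornibrook/puzzle_tools | frequency_analysis/frequency_analysis.py | _substitute_string
-- ===== SOURCE A (Python) =====
-- def _substitute_string(s1, s2, replace_char='?'):
--     """
--     Replaces instances of a special character (c) in string s1 by the contents of string s2
--     """
--
--     chars_added = 0
--     new_string = ''
--
--     for c in s1:
--         if c == replace_char:
--             new_string += s2[chars_added]
--             chars_added += 1
--         else:
--             new_string += c
--
--     return new_string
-- ===== SOURCE B (Python) =====
-- def _substitute_string(s1, s2, replace_char='?'):
--     positions = [i for i, c in enumerate(s1) if c == replace_char]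
--     chars = list(s1)
--     for k, p in enumerate(positions):
--         chars[p] = s2[k]
--     return ''.join(chars)
-- ===== Notes on version B (the rewrite author's own statement) =====
-- stated objective: alternative
-- what changed: Instead of a char-by-char scan that appends to a growing string while counting replacements, B first gathers the indices of all placeholder occurrences, then scatters successive characters of s2 into a mutable char list at those positions and joins it.
import Mathlib
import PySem

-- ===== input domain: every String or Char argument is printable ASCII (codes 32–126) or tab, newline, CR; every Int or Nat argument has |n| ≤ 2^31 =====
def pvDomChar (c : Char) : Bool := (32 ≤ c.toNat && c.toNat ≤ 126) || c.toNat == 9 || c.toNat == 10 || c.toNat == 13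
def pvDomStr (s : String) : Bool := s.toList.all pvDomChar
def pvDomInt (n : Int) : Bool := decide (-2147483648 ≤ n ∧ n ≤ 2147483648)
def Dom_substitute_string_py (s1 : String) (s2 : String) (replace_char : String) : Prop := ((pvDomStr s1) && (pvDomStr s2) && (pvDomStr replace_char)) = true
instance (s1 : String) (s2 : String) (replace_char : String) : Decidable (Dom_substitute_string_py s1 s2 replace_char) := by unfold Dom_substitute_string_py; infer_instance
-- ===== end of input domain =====

-- B replaces A's char-by-char accumulate-and-count scan with gather-positions-then-scatter (alternative decomposition, same cost); equivalence is proved on Pre_, which excludes only inputs where both raise IndexError.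

-- ===== PORT A =====
-- left-to-right scan; state = (chars_added, new_string); none = IndexError from s2[chars_added]
def substitute_string_py (s1 : String) (s2 : String) (replace_char : String) : String :=
  let r := s1.toList.foldl
    (fun (st : Option (Nat × List Char)) c =>
      match st with
      | none => none
      | some (n, acc) =>
        if [c] = replace_char.toList then
          match s2.toList[n]? with
          | some ch => some (n + 1, acc ++ [ch])
          | none => none
        else some (n, acc ++ [c]))
    (some (0, []))
  match r with
  | some (_, acc) => String.ofList acc
  | none => ""

-- ===== PORT B =====
-- gather the placeholder positions, then scatter s2's chars into the char list at those positions
def substitute_string_py_alt (s1 : String) (s2 : String) (replace_char : String) : String :=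
  let positions := (s1.toList.zipIdx).filterMap
    (fun ci => if [ci.1] = replace_char.toList then some ci.2 else none)
  let r := positions.foldl
    (fun (st : Nat × Option (List Char)) p =>
      match st with
      | (k, none) => (k + 1, none)
      | (k, some cs) =>
        match s2.toList[k]? with
        | some ch => (k + 1, some (cs.set p ch))
        | none => (k + 1, none))
    (0, some s1.toList)
  match r.2 with
  | some cs => String.ofList cs
  | none => ""

-- ===== PRECONDITION & SPEC =====
-- Pre_ excludes exactly the inputs where A raises IndexError (more placeholders in s1 than characters in s2)
def Pre_substitute_string_py (s1 : String) (s2 : String) (replace_char : String) : Prop :=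
  s1.toList.countP (fun c => [c] = replace_char.toList) ≤ s2.toList.length
instance (s1 : String) (s2 : String) (replace_char : String) : Decidable (Pre_substitute_string_py s1 s2 replace_char) := by unfold Pre_substitute_string_py; infer_instance

def pvWitness_substitute_string_py : String × String × String := ("a?b?c", "XY", "?")

def Spec_substitute_string_py (s1 : String) (s2 : String) (replace_char : String) (out : String) : Prop := out = substitute_string_py_alt s1 s2 replace_char
instance (s1 : String) (s2 : String) (replace_char : String) (out : String) : Decidable (Spec_substitute_string_py s1 s2 replace_char out) := by unfold Spec_substitute_string_py; infer_instance

-- ===== CLAIM (what is proved, stated in full; the proofs are below) =====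
def Claim_equal_substitute_string_py : Prop := ∀ (s1 : String) (s2 : String) (replace_char : String), Dom_substitute_string_py s1 s2 replace_char → Pre_substitute_string_py s1 s2 replace_char → Spec_substitute_string_py s1 s2 replace_char (substitute_string_py s1 s2 replace_char)

-- ===== LEMMAS AND PROOFS =====

-- the common value both ports compute: substitute chars of l, drawing from s2v starting at index n
def pvSub (s2v rc : List Char) : List Char → Nat → List Char
  | [], _ => []
  | c :: cs, n =>
    if [c] = rc then s2v.getD n 'a' :: pvSub s2v rc cs (n + 1)
    else c :: pvSub s2v rc cs n

theorem pvA_fold (s2v rc : List Char) (l : List Char) :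
    ∀ (n : Nat) (acc : List Char),
      n + l.countP (fun c => decide ([c] = rc)) ≤ s2v.length →
      l.foldl
        (fun (st : Option (Nat × List Char)) c =>
          match st with
          | none => none
          | some (n, acc) =>
            if [c] = rc then
              match s2v[n]? with
              | some ch => some (n + 1, acc ++ [ch])
              | none => none
            else some (n, acc ++ [c]))
        (some (n, acc))
      = some (n + l.countP (fun c => decide ([c] = rc)), acc ++ pvSub s2v rc l n) := by
  induction l with
  | nil => intro n acc h; simp [pvSub]
  | cons c cs ih =>
    intro n acc h
    by_cases hc : [c] = rc
    · have hcount : (c :: cs).countP (fun c => decide ([c] = rc))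
          = cs.countP (fun c => decide ([c] = rc)) + 1 := by
        simp [hc]
      have hn : n < s2v.length := by omega
      have hget : s2v[n]? = some (s2v.getD n 'a') := by
        simp [List.getD, List.getElem?_eq_getElem hn]
      simp only [List.foldl_cons, hc, if_true, hget]
      rw [ih (n + 1) (acc ++ [s2v.getD n 'a']) (by omega)]
      simp only [pvSub, hc, if_true, hcount]
      simp only [Option.some.injEq, Prod.mk.injEq]
      exact ⟨by omega, by simp⟩
    · have hcount : (c :: cs).countP (fun c => decide ([c] = rc))
          = cs.countP (fun c => decide ([c] = rc)) := by
        simp [hc]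
      simp only [List.foldl_cons, hc, if_false]
      rw [ih n (acc ++ [c]) (by omega)]
      simp [pvSub, hc, hcount]

theorem pvDrop_nil_take {cs : List Char} : ∀ {j : Nat}, cs.drop j = [] → cs.take j = cs := by
  induction cs with
  | nil => intro j _; simp
  | cons x xs ih =>
    intro j h
    cases j with
    | zero => simp at h
    | succ j => simp only [List.drop_succ_cons] at h; simp [ih h]

theorem pvDrop_cons {cs : List Char} {c : Char} {r : List Char} :
    ∀ {j : Nat}, cs.drop j = c :: r →
      cs.drop (j + 1) = r ∧ cs.take (j + 1) = cs.take j ++ [c] ∧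
      ∀ x, (cs.set j x).drop (j + 1) = r ∧ (cs.set j x).take (j + 1) = cs.take j ++ [x] := by
  induction cs with
  | nil => intro j h; simp at h
  | cons y ys ih =>
    intro j h
    cases j with
    | zero =>
      simp only [List.drop_zero] at h
      obtain ⟨rfl, rfl⟩ : y = c ∧ ys = r := by simpa using h
      refine ⟨by simp, by simp, fun x => ⟨by simp, by simp⟩⟩
    | succ j =>
      simp only [List.drop_succ_cons] at h
      obtain ⟨h1, h2, h3⟩ := ih h
      refine ⟨by simpa using h1, by simp [h2], fun x => ?_⟩
      obtain ⟨h4, h5⟩ := h3 x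
      exact ⟨by simpa using h4, by simp [h5]⟩

theorem pvB_fold (s2v rc : List Char) (l : List Char) :
    ∀ (j k : Nat) (cs : List Char),
      cs.drop j = l →
      k + l.countP (fun c => decide ([c] = rc)) ≤ s2v.length →
      ((l.zipIdx j).filterMap
          (fun ci => if [ci.1] = rc then some ci.2 else none)).foldl
        (fun (st : Nat × Option (List Char)) p =>
          match st with
          | (k, none) => (k + 1, none)
          | (k, some cs) =>
            match s2v[k]? with
            | some ch => (k + 1, some (cs.set p ch))
            | none => (k + 1, none))
        (k, some cs)
      = (k + l.countP (fun c => decide ([c] = rc)), some (cs.take j ++ pvSub s2v rc l k)) := by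
  induction l with
  | nil =>
    intro j k cs hdrop h
    simp [pvSub, pvDrop_nil_take hdrop]
  | cons c cs' ih =>
    intro j k cs hdrop h
    obtain ⟨hdrop', htake', hset⟩ := pvDrop_cons hdrop
    by_cases hc : [c] = rc
    · have hcount : (c :: cs').countP (fun c => decide ([c] = rc))
          = cs'.countP (fun c => decide ([c] = rc)) + 1 := by
        simp [hc]
      have hk : k < s2v.length := by omega
      have hget : s2v[k]? = some (s2v.getD k 'a') := by
        simp [List.getD, List.getElem?_eq_getElem hk]
      obtain ⟨hsd, hst⟩ := hset (s2v.getD k 'a')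
      simp only [List.zipIdx_cons, List.filterMap_cons, hc, if_true, List.foldl_cons, hget]
      rw [ih (j + 1) (k + 1) (cs.set j (s2v.getD k 'a')) hsd (by omega)]
      rw [hst]
      simp only [pvSub, hc, if_true, hcount]
      simp only [Option.some.injEq, Prod.mk.injEq]
      exact ⟨by omega, by simp⟩
    · have hcount : (c :: cs').countP (fun c => decide ([c] = rc))
          = cs'.countP (fun c => decide ([c] = rc)) := by
        simp [hc]
      simp only [List.zipIdx_cons, List.filterMap_cons, hc, if_false]
      rw [ih (j + 1) k cs hdrop' (by omega)]
      rw [htake']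
      simp [pvSub, hc, hcount]

-- ===== VERDICT (by name: the statement is the Claim_ definition above) =====
theorem substitute_string_py_spec : Claim_equal_substitute_string_py := by
  intro s1 s2 rc _ hpre
  unfold Spec_substitute_string_py substitute_string_py substitute_string_py_alt
  have hA := pvA_fold s2.toList rc.toList s1.toList 0 []
    (by simpa [Pre_substitute_string_py] using hpre)
  have hB := pvB_fold s2.toList rc.toList s1.toList 0 0 s1.toList (by simp)
    (by simpa [Pre_substitute_string_py] using hpre)
  simp only [hA, hB]
  simp
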